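-- pv_equiv track=rewrite | github.com/Rahulwadhwa157/JPEG-Baseline-Compression | encoding.py | vlicode_int
-- ===== SOURCE A (Python) =====
-- def vlicode_int(s):
--     sign=1
--     n=len(s)
--     if n==0:
--         return 0
--     if s[0]=='0':
--         sign=-1
--
--     x=0
--
--     for i in range(n):
--         t=int(s[i])
--         if sign==-1:
--             t=1-t
--
--         x=2*x+t
--     return sign*x
-- ===== SOURCE B (Python) =====
-- def vlicode_int(s):
--     if not s:
--         return 0
--     raw = sum(int(ch) << k for k, ch in enumerate(reversed(s)))
--     if s[0] == '0':
--         return raw - ((1 << len(s)) - 1)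
--     return raw
-- ===== Notes on version B (the rewrite author's own statement) =====
-- stated objective: simpler
-- what changed: Parses the raw digit string once as a weighted sum (no sign-dependent per-digit complementing), then for the negative case applies the closed-form ones'-complement identity: result = raw - (2**len(s) - 1), replacing A's per-character t=1-t adjustment inside a Horner loop.
import Mathlib
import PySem

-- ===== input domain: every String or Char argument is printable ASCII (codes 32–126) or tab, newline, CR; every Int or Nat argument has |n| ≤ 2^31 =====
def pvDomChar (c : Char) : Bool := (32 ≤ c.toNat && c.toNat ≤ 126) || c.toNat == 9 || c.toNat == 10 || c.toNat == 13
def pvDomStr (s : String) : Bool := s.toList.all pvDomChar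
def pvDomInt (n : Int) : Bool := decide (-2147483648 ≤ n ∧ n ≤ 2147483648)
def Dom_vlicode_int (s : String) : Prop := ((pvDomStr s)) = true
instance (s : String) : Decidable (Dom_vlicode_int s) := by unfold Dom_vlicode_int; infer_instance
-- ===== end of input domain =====

-- ===== PORT A =====
-- B parses the raw digits once as a weighted sum and handles the negative case by the
-- closed-form ones'-complement identity raw - (2^n - 1), instead of A's sign-dependent
-- per-digit complement inside a Horner loop (simpler decomposition, same cost).
def vlicode_int (s : String) : Int :=
  match s.toList with
  | [] => 0                                   -- n == 0: return 0
  | c0 :: rest =>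
    let sign : Int := if c0 = '0' then -1 else 1
    let x := (c0 :: rest).foldl (fun x c =>
      let t : Int := (PySem.Int.ofChars? [c]).getD 0   -- int(s[i]); ValueError (non-digit) excluded by Pre_
      let t := if sign = -1 then 1 - t else t
      2 * x + t) 0
    sign * x

-- ===== PORT B =====
def vlicode_int_alt (s : String) : Int :=
  match s.toList with
  | [] => 0
  | c0 :: rest =>
    -- raw = sum(int(ch) << k for k, ch in enumerate(reversed(s)))
    let raw := ((PySem.List.enumerate (c0 :: rest).reverse 0).map
      (fun p => ((PySem.Int.ofChars? [p.2]).getD 0) * 2 ^ p.1.toNat)).sum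
    if c0 = '0' then raw - (2 ^ (c0 :: rest).length - 1) else raw

-- ===== PRECONDITION & SPEC =====
-- Pre_ excludes exactly the inputs where Python's int(ch) raises ValueError: strings with a non-digit character.
def Pre_vlicode_int (s : String) : Prop := s.toList.all Char.isDigit = true
instance (s : String) : Decidable (Pre_vlicode_int s) := by unfold Pre_vlicode_int; infer_instance
def pvWitness_vlicode_int : String := "101"
def Spec_vlicode_int (s : String) (out : Int) : Prop := out = vlicode_int_alt s
instance (s : String) (out : Int) : Decidable (Spec_vlicode_int s out) := by unfold Spec_vlicode_int; infer_instance

-- ===== CLAIM (what is proved, stated in full; the proofs are below) =====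
def Claim_equal_vlicode_int : Prop := ∀ (s : String), Dom_vlicode_int s → Pre_vlicode_int s → Spec_vlicode_int s (vlicode_int s)

-- ===== LEMMAS AND PROOFS =====

-- Reference value: the base-2 polynomial with digit values g c.
def pvRef (g : Char → Int) : List Char → Int
  | [] => 0
  | c :: rest => g c * 2 ^ rest.length + pvRef g rest

theorem pvHorner (g : Char → Int) (cs : List Char) (a : Int) :
    cs.foldl (fun x c => 2 * x + g c) a = a * 2 ^ cs.length + pvRef g cs := by
  induction cs generalizing a with
  | nil => simp [pvRef]
  | cons c rest ih => simp [List.foldl, pvRef, ih]; ring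

theorem pvSum (g : Char → Int) (cs : List Char) :
    ((PySem.List.enumerate cs.reverse 0).map (fun p => g p.2 * 2 ^ p.1.toNat)).sum
      = pvRef g cs := by
  induction cs with
  | nil => simp [pvRef]
  | cons c rest ih =>
    rw [List.reverse_cons, PySem.List.enumerate_append, List.map_append, List.sum_append, ih]
    simp [PySem.List.enumerate, pvRef]
    ring

-- ones'-complement identity: complementing every digit equals (2^n - 1) minus the raw value
theorem pvCompl (g : Char → Int) (cs : List Char) :
    pvRef (fun c => 1 - g c) cs = (2 ^ cs.length - 1) - pvRef g cs := by
  induction cs with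
  | nil => simp [pvRef]
  | cons c rest ih => simp [pvRef, ih, pow_succ]; ring

-- ===== VERDICT (by name: the statement is the Claim_ definition above) =====
theorem vlicode_int_spec : Claim_equal_vlicode_int := by
  intro s _ _
  unfold Spec_vlicode_int vlicode_int vlicode_int_alt
  cases h : s.toList with
  | nil => rfl
  | cons c0 rest =>
    simp only
    rw [pvSum (fun c => (PySem.Int.ofChars? [c]).getD 0) (c0 :: rest)]
    by_cases hc : c0 = '0'
    · simp only [hc, if_true]
      rw [pvHorner (fun c => 1 - (PySem.Int.ofChars? [c]).getD 0) ('0' :: rest) 0]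
      rw [show (fun c => (1 : Int) - (PySem.Int.ofChars? [c]).getD 0)
            = (fun c => 1 - (fun c => ((PySem.Int.ofChars? [c]).getD 0 : Int)) c) from rfl,
          pvCompl (fun c => (PySem.Int.ofChars? [c]).getD 0) ('0' :: rest)]
      ring
    · simp only [if_neg hc]
      have h1 : (1 : Int) ≠ -1 := by decide
      simp only [if_neg h1]
      rw [pvHorner (fun c => (PySem.Int.ofChars? [c]).getD 0) (c0 :: rest) 0]
      ring
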